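-- pv_equiv track=rewrite | github.com/poiuy17/adventofcode | 2024/day09/solution.py | create_free_space
-- ===== SOURCE A (Python) =====
-- def create_free_space(blocks):
--     free_space = []
--     length = 0
--     idx = -1
--     for i, v in enumerate(blocks):
--         if v is None:
--             if length == 0:
--                 idx = i
--             length += 1
--         else:
--             if length > 0:
--                 free_space.append((idx, length))
--             length = 0
--     if length > 0:
--         free_space.append((idx, length))
--
--     return free_space
-- ===== SOURCE B (Python) =====
-- def create_free_space(blocks):
--     n = len(blocks)
--     free_space = []
--     i = 0
--     while i < n:
--         if blocks[i] is None:
--             j = i + 1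
--             while j < n and blocks[j] is None:
--                 j += 1
--             free_space.append((i, j - i))
--             i = j
--         else:
--             i += 1
--     return free_space
-- ===== Notes on version B (the rewrite author's own statement) =====
-- stated objective: alternative
-- what changed: Replaced the sentinel-state (length/idx) single pass with trailing flush by an index-based run scan: an inner loop consumes each run of None and emits (start, end-start) directly, no carried state and no flush.
import Mathlib
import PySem

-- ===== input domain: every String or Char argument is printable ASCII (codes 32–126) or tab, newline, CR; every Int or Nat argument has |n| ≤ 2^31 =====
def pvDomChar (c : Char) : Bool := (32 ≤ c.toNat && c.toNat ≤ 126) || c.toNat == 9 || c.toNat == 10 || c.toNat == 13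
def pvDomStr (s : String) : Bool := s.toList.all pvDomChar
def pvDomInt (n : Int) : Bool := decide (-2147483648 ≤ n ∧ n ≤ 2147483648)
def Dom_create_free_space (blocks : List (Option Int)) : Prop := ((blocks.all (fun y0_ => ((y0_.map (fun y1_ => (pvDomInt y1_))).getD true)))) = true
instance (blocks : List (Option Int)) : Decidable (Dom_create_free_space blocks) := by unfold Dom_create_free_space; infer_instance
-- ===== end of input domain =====

-- B replaces A's sentinel-state (length/idx) pass + trailing flush by an index-based run scan
-- that consumes each None-run with an inner loop and emits (start, end-start) directly (alternative decomposition).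


-- ===== PORT A =====
-- A: fold over enumerate(blocks) carrying (free_space, length, idx); flush the pending run at the end.
def create_free_space (blocks : List (Option Int)) : List (Int × Int) :=
  let st := (PySem.List.enumerate blocks).foldl
    (fun (st : List (Int × Int) × Int × Int) p =>
      let fs := st.1
      let length := st.2.1
      let idx := st.2.2
      match p.2 with
      | none =>
        let idx := if length == 0 then p.1 else idx
        (fs, length + 1, idx)
      | some _ =>
        if length > 0 then (fs ++ [(idx, length)], 0, idx)
        else (fs, 0, idx))
    ([], 0, -1)
  if st.2.1 > 0 then st.1 ++ [(st.2.2, st.2.1)] else st.1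

-- ===== PORT B =====
-- inner while loop: advance j while j < n and blocks[j] is None
def pvAltInner (blocks : List (Option Int)) (n : Nat) (j : Nat) : Nat :=
  if j < n ∧ blocks[j]? = some none then pvAltInner blocks n (j + 1) else j
termination_by n - j
decreasing_by omega

theorem pvAltInner_ge (blocks : List (Option Int)) (n j : Nat) : j ≤ pvAltInner blocks n j := by
  rw [pvAltInner]
  split
  · exact le_trans (by omega) (pvAltInner_ge blocks n (j + 1))
  · exact le_refl j
termination_by n - j
decreasing_by rename_i h; omega

-- outer while loop over the index i
def pvAltGo (blocks : List (Option Int)) (n : Nat) (i : Nat) : List (Int × Int) :=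
  if i < n then
    if blocks[i]? = some none then
      let j := pvAltInner blocks n (i + 1)
      ((i : Int), (j : Int) - (i : Int)) :: pvAltGo blocks n j
    else pvAltGo blocks n (i + 1)
  else []
termination_by n - i
decreasing_by
  · have := pvAltInner_ge blocks n (i + 1); omega
  · omega

def create_free_space_alt (blocks : List (Option Int)) : List (Int × Int) :=
  pvAltGo blocks blocks.length 0

-- ===== PRECONDITION & SPEC =====
def Spec_create_free_space (blocks : List (Option Int)) (out : List (Int × Int)) : Prop := out = create_free_space_alt blocks
instance (blocks : List (Option Int)) (out : List (Int × Int)) : Decidable (Spec_create_free_space blocks out) := by unfold Spec_create_free_space; infer_instance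

-- ===== CLAIM (what is proved, stated in full; the proofs are below) =====
def Claim_equal_create_free_space : Prop := ∀ (blocks : List (Option Int)), Dom_create_free_space blocks → Spec_create_free_space blocks (create_free_space blocks)

-- ===== LEMMAS AND PROOFS =====

-- length of the leading run of `none`s
def pvRunLen : List (Option Int) → Nat
  | none :: rest => pvRunLen rest + 1
  | _ => 0

-- structural reference version of B's scan
def pvGoL : List (Option Int) → Int → List (Int × Int)
  | [], _ => []
  | some _ :: rest, s => pvGoL rest (s + 1)
  | none :: rest, s =>
      (s, (pvRunLen rest : Int) + 1) :: pvGoL (rest.drop (pvRunLen rest)) (s + (pvRunLen rest : Int) + 1)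
termination_by bs _ => bs.length
decreasing_by
  · simp
  · simp [List.length_drop]

theorem pvRunLen_le (bs : List (Option Int)) : pvRunLen bs ≤ bs.length := by
  induction bs with
  | nil => simp [pvRunLen]
  | cons x rest ih => cases x <;> simp [pvRunLen] <;> omega

theorem pvAltInner_eq (blocks : List (Option Int)) (j : Nat) :
    pvAltInner blocks blocks.length j = j + pvRunLen (blocks.drop j) := by
  by_cases h : j < blocks.length
  · have hd : blocks.drop j = blocks[j] :: blocks.drop (j + 1) := List.drop_eq_getElem_cons h
    cases hv : blocks[j] with
    | none =>
      have : blocks[j]? = some none := by rw [List.getElem?_eq_getElem h, hv]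
      rw [pvAltInner]
      simp only [h, this, and_self, if_true]
      rw [pvAltInner_eq blocks (j + 1)]
      rw [hd, hv]
      simp only [pvRunLen]
      omega
    | some v =>
      have hg : blocks[j]? = some (some v) := by rw [List.getElem?_eq_getElem h, hv]
      rw [pvAltInner, if_neg (by simp [hg]), hd, hv]
      simp [pvRunLen]
  · have hd : blocks.drop j = [] := List.drop_eq_nil_of_le (by omega)
    rw [pvAltInner, if_neg (by simp [h]), hd]
    simp [pvRunLen]
termination_by blocks.length - j
decreasing_by omega

theorem pvAltGo_eq (blocks : List (Option Int)) (i : Nat) :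
    pvAltGo blocks blocks.length i = pvGoL (blocks.drop i) (i : Int) := by
  rw [pvAltGo]
  by_cases h : i < blocks.length
  · have hd : blocks.drop i = blocks[i] :: blocks.drop (i + 1) := List.drop_eq_getElem_cons h
    cases hv : blocks[i] with
    | none =>
      have hg : blocks[i]? = some none := by rw [List.getElem?_eq_getElem h, hv]
      simp only [h, if_true, hg]
      rw [pvAltInner_eq blocks (i + 1)]
      rw [pvAltGo_eq blocks (i + 1 + pvRunLen (blocks.drop (i + 1)))]
      rw [hd, hv]
      have hdd : blocks.drop (i + 1 + pvRunLen (blocks.drop (i + 1)))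
          = (blocks.drop (i + 1)).drop (pvRunLen (blocks.drop (i + 1))) := by
        rw [List.drop_drop]
      rw [hdd]
      simp only [pvGoL]
      push_cast
      ring_nf
    | some v =>
      have hg : blocks[i]? = some (some v) := by rw [List.getElem?_eq_getElem h, hv]
      simp only [h, if_true, hg]
      rw [if_neg (by simp)]
      rw [pvAltGo_eq blocks (i + 1)]
      rw [hd, hv]
      simp only [pvGoL]
      push_cast
      ring_nf
  · have hd : blocks.drop i = [] := List.drop_eq_nil_of_le (by omega)
    simp [h, hd, pvGoL]
termination_by blocks.length - i
decreasing_by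
  · have := pvRunLen_le (blocks.drop (i + 1)); omega
  · omega

-- A's loop step
def pvAStep (st : List (Int × Int) × Int × Int) (p : Int × Option Int) : List (Int × Int) × Int × Int :=
  let fs := st.1
  let length := st.2.1
  let idx := st.2.2
  match p.2 with
  | none =>
    let idx := if length == 0 then p.1 else idx
    (fs, length + 1, idx)
  | some _ =>
    if length > 0 then (fs ++ [(idx, length)], 0, idx)
    else (fs, 0, idx)

def pvFinish (st : List (Int × Int) × Int × Int) : List (Int × Int) :=
  if st.2.1 > 0 then st.1 ++ [(st.2.2, st.2.1)] else st.1

theorem pvFoldA (bs : List (Option Int)) : ∀ (s : Int) (fs : List (Int × Int)) (len idx : Int),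
    0 ≤ len →
    pvFinish ((PySem.List.enumerate bs s).foldl pvAStep (fs, len, idx)) =
      (if 0 < len then
        fs ++ (idx, len + (pvRunLen bs : Int)) :: pvGoL (bs.drop (pvRunLen bs)) (s + (pvRunLen bs : Int))
      else fs ++ pvGoL bs s) := by
  induction bs with
  | nil =>
    intro s fs len idx hlen
    simp only [PySem.List.enumerate_nil, List.foldl_nil, pvFinish, pvGoL, pvRunLen,
      List.drop_nil]
    split_ifs with h <;> simp
  | cons x rest ih =>
    intro s fs len idx hlen
    rw [PySem.List.enumerate_cons, List.foldl_cons]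
    cases x with
    | none =>
      by_cases h0 : 0 < len
      · have hne : (len == 0) = false := beq_eq_false_iff_ne.mpr (by omega)
        simp only [pvAStep, hne, if_false, Bool.false_eq_true]
        rw [ih (s + 1) fs (len + 1) idx (by omega)]
        have h1 : (0 : Int) < len + 1 := by omega
        simp only [h1, if_true, h0, pvRunLen, List.drop_succ_cons]
        push_cast
        ring_nf
      · have hz : len = 0 := by omega
        subst hz
        simp only [pvAStep, beq_self_eq_true, if_true]
        rw [ih (s + 1) fs (0 + 1) s (by omega)]
        simp only [show (0:Int) < 0 + 1 from by omega, if_true, lt_irrefl, if_false, pvGoL]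
        push_cast
        ring_nf
    | some v =>
      by_cases h0 : 0 < len
      · simp only [pvAStep, h0, if_true]
        rw [ih (s + 1) (fs ++ [(idx, len)]) 0 idx (by omega)]
        simp only [lt_irrefl, if_false, pvRunLen, List.drop_zero, pvGoL]
        simp
      · have hz : len = 0 := by omega
        subst hz
        simp only [pvAStep, lt_irrefl, if_false]
        rw [ih (s + 1) fs 0 idx (by omega)]
        simp [pvGoL]

-- ===== VERDICT (by name: the statement is the Claim_ definition above) =====
theorem create_free_space_spec : Claim_equal_create_free_space := by
  intro blocks _
  show create_free_space blocks = create_free_space_alt blocks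
  have ha : create_free_space blocks =
      pvFinish ((PySem.List.enumerate blocks 0).foldl pvAStep ([], 0, -1)) := rfl
  rw [ha, pvFoldA blocks 0 [] 0 (-1) (by omega)]
  rw [create_free_space_alt, pvAltGo_eq blocks 0]
  simp
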